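-- pv_equiv track=rewrite | github.com/mrunalimanj/170proj | greedy/anneal.py | get_new_order
-- ===== SOURCE A (Python) =====
-- def get_new_order(old_order, i, j):
--     order = [i for i in old_order]
--     if i in order and j in order:
--         # clean swap
--         ind_i, ind_j = order.index(i), order.index(j)
--         order[ind_i], order[ind_j] = j, i
--         return order
--
--     elif i in order or j in order:
--         # how to swap? if one of the tasks wasnt even able to be scheduled?
--         # let's just try a swap out for right now
--
--         if i in order:
--             ind_i = order.index(i)
--             order[ind_i] = j
--
--         else:
--             ind_j = order.index(j)
--             order[ind_j] = i
--
--         return order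
--
--     else:
--         return order # no point in switching, need to resample
-- ===== SOURCE B (Python) =====
-- def get_new_order(old_order, i, j):
--     # One pass: substitute the first occurrence of i with j and the first
--     # occurrence of j with i while building the result list.
--     res = []
--     done_i = done_j = False
--     for x in old_order:
--         if x == i and not done_i:
--             res.append(j)
--             done_i = True
--         elif x == j and not done_j:
--             res.append(i)
--             done_j = True
--         else:
--             res.append(x)
--     return res
-- ===== Notes on version B (the rewrite author's own statement) =====
-- stated objective: simpler
-- what changed: Replaces the copy + membership tests + .index/assignment branching with a single pass over old_order carrying two done flags that substitute the first occurrence of i with j and of j with i.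
import Mathlib
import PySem

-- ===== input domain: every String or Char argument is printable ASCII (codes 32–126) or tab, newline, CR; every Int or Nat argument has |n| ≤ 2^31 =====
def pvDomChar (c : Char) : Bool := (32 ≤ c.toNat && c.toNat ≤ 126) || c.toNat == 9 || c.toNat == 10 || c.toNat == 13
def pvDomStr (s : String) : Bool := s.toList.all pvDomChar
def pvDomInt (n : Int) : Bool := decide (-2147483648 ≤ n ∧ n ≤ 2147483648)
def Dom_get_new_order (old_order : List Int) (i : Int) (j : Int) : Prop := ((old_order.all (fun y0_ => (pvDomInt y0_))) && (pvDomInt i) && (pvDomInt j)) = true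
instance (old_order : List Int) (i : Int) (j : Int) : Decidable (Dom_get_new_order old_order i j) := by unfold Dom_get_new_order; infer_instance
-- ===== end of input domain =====

-- B builds the swapped order in one pass with two done flags instead of copying and
-- patching via membership tests and .index; objective: simpler.

-- ===== PORT A =====
-- order = [i for i in old_order]  (a plain copy); order.index is PySem.List.index?,
-- the assignments order[k] = v (k a nonnegative .index result) are List.set.
def get_new_order (old_order : List Int) (i : Int) (j : Int) : List Int :=
  let order := old_order.map (fun i => i)
  if order.contains i && order.contains j then
    match PySem.List.index? order i, PySem.List.index? order j with
    | some ii, some jj => (order.set ii j).set jj i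
    | _, _ => order  -- unreachable: both memberships hold
  else if order.contains i || order.contains j then
    if order.contains i then
      match PySem.List.index? order i with
      | some ii => order.set ii j
      | none => order  -- unreachable
    else
      match PySem.List.index? order j with
      | some jj => order.set jj i
      | none => order  -- unreachable
  else order

-- ===== PORT B =====
-- loop body of B: state is (res, done_i, done_j)
def swapStep (i j : Int) (s : List Int × Bool × Bool) (x : Int) : List Int × Bool × Bool :=
  if x == i && !s.2.1 then (s.1 ++ [j], true, s.2.2)
  else if x == j && !s.2.2 then (s.1 ++ [i], s.2.1, true)
  else (s.1 ++ [x], s.2.1, s.2.2)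

def get_new_order_alt (old_order : List Int) (i : Int) (j : Int) : List Int :=
  (old_order.foldl (swapStep i j) (([] : List Int), false, false)).1

-- ===== PRECONDITION & SPEC =====
def Spec_get_new_order (old_order : List Int) (i : Int) (j : Int) (out : List Int) : Prop := out = get_new_order_alt old_order i j
instance (old_order : List Int) (i : Int) (j : Int) (out : List Int) : Decidable (Spec_get_new_order old_order i j out) := by unfold Spec_get_new_order; infer_instance

-- ===== CLAIM (what is proved, stated in full; the proofs are below) =====
def Claim_equal_get_new_order : Prop := ∀ (old_order : List Int) (i : Int) (j : Int), Dom_get_new_order old_order i j → Spec_get_new_order old_order i j (get_new_order old_order i j)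

-- ===== LEMMAS AND PROOFS =====

-- structural form of B's fold
def swapRec (i j : Int) (di dj : Bool) : List Int → List Int
  | [] => []
  | x :: t =>
    if x == i && !di then j :: swapRec i j true dj t
    else if x == j && !dj then i :: swapRec i j di true t
    else x :: swapRec i j di dj t

-- replace the first occurrence of a by b
def rf (l : List Int) (a b : Int) : List Int :=
  match l with
  | [] => []
  | x :: t => if x = a then b :: t else x :: rf t a b

theorem foldl_swapRec (i j : Int) (l : List Int) : ∀ (acc : List Int) (di dj : Bool),
    (l.foldl (swapStep i j) (acc, di, dj)).1 = acc ++ swapRec i j di dj l := by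
  induction l with
  | nil => intro acc di dj; simp [swapRec]
  | cons x t ih =>
    intro acc di dj
    rw [List.foldl_cons]
    by_cases h1 : (x == i && !di) = true
    · have hs : swapStep i j (acc, di, dj) x = (acc ++ [j], true, dj) := by
        simp only [swapStep]; rw [if_pos h1]
      rw [hs, ih, swapRec, if_pos h1]
      simp
    · by_cases h2 : (x == j && !dj) = true
      · have hs : swapStep i j (acc, di, dj) x = (acc ++ [i], di, true) := by
          simp only [swapStep]; rw [if_neg h1, if_pos h2]
        rw [hs, ih, swapRec, if_neg h1, if_pos h2]
        simp
      · have hs : swapStep i j (acc, di, dj) x = (acc ++ [x], di, dj) := by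
          simp only [swapStep]; rw [if_neg h1, if_neg h2]
        rw [hs, ih, swapRec, if_neg h1, if_neg h2]
        simp

theorem alt_eq_swapRec (old_order : List Int) (i j : Int) :
    get_new_order_alt old_order i j = swapRec i j false false old_order := by
  simpa using foldl_swapRec i j old_order [] false false

theorem rf_self (l : List Int) (a : Int) : rf l a a = l := by
  induction l with
  | nil => rfl
  | cons x t ih =>
    by_cases h : x = a
    · simp [rf, h]
    · simp [rf, h, ih]

theorem rf_not_mem (l : List Int) (a b : Int) (h : a ∉ l) : rf l a b = l := by
  induction l with
  | nil => rfl
  | cons x t ih =>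
    simp only [List.mem_cons, not_or] at h
    have hx : x ≠ a := fun e => h.1 e.symm
    simp [rf, hx, ih h.2]

theorem set_index_eq_rf (a b : Int) (l : List Int) : ∀ (n : Nat),
    PySem.List.index? l a = some n → l.set n b = rf l a b := by
  induction l with
  | nil => intro n h; simp [PySem.List.index?_eq_idxOf?] at h
  | cons x t ih =>
    intro n h
    by_cases hx : x = a
    · subst hx
      rw [PySem.List.index?_cons_self] at h
      cases h
      simp [rf]
    · rw [PySem.List.index?_cons_of_ne t hx] at h
      rcases Option.map_eq_some_iff.mp h with ⟨m, hm, rfl⟩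
      simp [rf, hx, ih m hm]

-- once done_i is set, a list without j is left untouched
theorem swapRec_i_blocked (i j : Int) (l : List Int) (h : j ∉ l) :
    ∀ dj, swapRec i j true dj l = l := by
  induction l with
  | nil => intro dj; rfl
  | cons x t ih =>
    intro dj
    simp only [List.mem_cons, not_or] at h
    have h1 : ¬((x == i && !true) = true) := by simp
    have h2 : ¬((x == j && !dj) = true) := by
      simp only [Bool.and_eq_true, beq_iff_eq, not_and]
      exact fun e => absurd e.symm h.1
    rw [swapRec, if_neg h1, if_neg h2, ih h.2]

theorem swapRec_j_blocked (i j : Int) (l : List Int) (h : i ∉ l) :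
    ∀ di, swapRec i j di true l = l := by
  induction l with
  | nil => intro di; rfl
  | cons x t ih =>
    intro di
    simp only [List.mem_cons, not_or] at h
    have h1 : ¬((x == i && !di) = true) := by
      simp only [Bool.and_eq_true, beq_iff_eq, not_and]
      exact fun e => absurd e.symm h.1
    have h2 : ¬((x == j && !true) = true) := by simp
    rw [swapRec, if_neg h1, if_neg h2, ih h.2]

-- both done: everything untouched
theorem swapRec_done (i j : Int) (l : List Int) : swapRec i j true true l = l := by
  induction l with
  | nil => rfl
  | cons x t ih => simp [swapRec, ih]

-- with done_j set, the pass replaces the first i by j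
theorem swapRec_only_i (i j : Int) (l : List Int) : swapRec i j false true l = rf l i j := by
  induction l with
  | nil => rfl
  | cons x t ih =>
    by_cases hx : x = i
    · subst hx
      rw [swapRec, if_pos (by simp), rf, if_pos rfl, swapRec_done]
    · have h1 : ¬((x == i && !false) = true) := by simp [hx]
      have h2 : ¬((x == j && !true) = true) := by simp
      rw [swapRec, if_neg h1, if_neg h2, ih, rf, if_neg hx]

-- with done_i set, the pass replaces the first j by i
theorem swapRec_only_j (i j : Int) (l : List Int) : swapRec i j true false l = rf l j i := by
  induction l with
  | nil => rfl
  | cons x t ih =>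
    by_cases hx : x = j
    · subst hx
      rw [swapRec, if_neg (by simp), if_pos (by simp), rf, if_pos rfl, swapRec_done]
    · have h1 : ¬((x == i && !true) = true) := by simp
      have h2 : ¬((x == j && !false) = true) := by simp [hx]
      rw [swapRec, if_neg h1, if_neg h2, ih, rf, if_neg hx]

theorem swapRec_no_j (i j : Int) (l : List Int) (h : j ∉ l) :
    swapRec i j false false l = rf l i j := by
  induction l with
  | nil => rfl
  | cons x t ih =>
    simp only [List.mem_cons, not_or] at h
    by_cases hx : x = i
    · subst hx
      rw [swapRec, if_pos (by simp), rf, if_pos rfl, swapRec_i_blocked _ _ _ h.2]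
    · have h1 : ¬((x == i && !false) = true) := by simp [hx]
      have h2 : ¬((x == j && !false) = true) := by
        simp only [Bool.and_eq_true, beq_iff_eq, not_and]
        exact fun e => absurd e.symm h.1
      rw [swapRec, if_neg h1, if_neg h2, ih h.2, rf, if_neg hx]

theorem swapRec_no_i (i j : Int) (l : List Int) (h : i ∉ l) :
    swapRec i j false false l = rf l j i := by
  induction l with
  | nil => rfl
  | cons x t ih =>
    simp only [List.mem_cons, not_or] at h
    by_cases hx : x = j
    · subst hx
      have h1 : ¬((x == i && !false) = true) := by
        simp only [Bool.and_eq_true, beq_iff_eq, not_and]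
        exact fun e => absurd e.symm h.1
      rw [swapRec, if_neg h1, if_pos (by simp), rf, if_pos rfl, swapRec_j_blocked _ _ _ h.2]
    · have h1 : ¬((x == i && !false) = true) := by
        simp only [Bool.and_eq_true, beq_iff_eq, not_and]
        exact fun e => absurd e.symm h.1
      have h2 : ¬((x == j && !false) = true) := by simp [hx]
      rw [swapRec, if_neg h1, if_neg h2, ih h.2, rf, if_neg hx]

-- i = j: every substitution rewrites the element to itself
theorem swapRec_self (i : Int) (l : List Int) : ∀ di dj, swapRec i i di dj l = l := by
  induction l with
  | nil => intro di dj; rfl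
  | cons x t ih =>
    intro di dj
    by_cases h1 : (x == i && !di) = true
    · have hx : x = i := by simpa using (Bool.and_elim_left h1)
      rw [swapRec, if_pos h1, ih, hx]
    · by_cases h2 : (x == i && !dj) = true
      · have hx : x = i := by simpa using (Bool.and_elim_left h2)
        rw [swapRec, if_neg h1, if_pos h2, ih, hx]
      · rw [swapRec, if_neg h1, if_neg h2, ih]

-- the "clean swap" branch of A agrees with the single pass
theorem swapRec_both (i j : Int) (hij : i ≠ j) (l : List Int) : ∀ (ii jj : Nat),
    PySem.List.index? l i = some ii → PySem.List.index? l j = some jj →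
    (l.set ii j).set jj i = swapRec i j false false l := by
  induction l with
  | nil => intro ii jj hi _; simp [PySem.List.index?_eq_idxOf?] at hi
  | cons x t ih =>
    intro ii jj hi hj
    by_cases hxi : x = i
    · rw [hxi] at hi hj ⊢
      rw [PySem.List.index?_cons_self] at hi
      cases hi
      rw [PySem.List.index?_cons_of_ne t hij] at hj
      rcases Option.map_eq_some_iff.mp hj with ⟨m, hm, rfl⟩
      rw [swapRec, if_pos (by simp), swapRec_only_j]
      simp [set_index_eq_rf j i t m hm]
    · by_cases hxj : x = j
      · rw [hxj] at hi hj ⊢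
        rw [PySem.List.index?_cons_self] at hj
        cases hj
        rw [PySem.List.index?_cons_of_ne t (fun (e : j = i) => hij e.symm)] at hi
        rcases Option.map_eq_some_iff.mp hi with ⟨m, hm, rfl⟩
        have h1 : ¬((j == i && !false) = true) := by simp [Ne.symm hij]
        rw [swapRec, if_neg h1, if_pos (by simp), swapRec_only_i]
        simp [set_index_eq_rf i j t m hm]
      · rw [PySem.List.index?_cons_of_ne t hxi] at hi
        rw [PySem.List.index?_cons_of_ne t hxj] at hj
        rcases Option.map_eq_some_iff.mp hi with ⟨m, hm, rfl⟩
        rcases Option.map_eq_some_iff.mp hj with ⟨m', hm', rfl⟩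
        have h1 : ¬((x == i && !false) = true) := by simp [hxi]
        have h2 : ¬((x == j && !false) = true) := by simp [hxj]
        rw [swapRec, if_neg h1, if_neg h2, ← ih m m' hm hm']
        simp

-- ===== VERDICT (by name: the statement is the Claim_ definition above) =====
theorem get_new_order_spec : Claim_equal_get_new_order := by
  intro old_order i j _
  unfold Spec_get_new_order get_new_order
  rw [alt_eq_swapRec]
  simp only [List.map_id_fun', id]
  by_cases hi : i ∈ old_order
  · by_cases hj : j ∈ old_order
    · rw [if_pos (by simp [hi, hj])]
      rcases Option.isSome_iff_exists.mp ((PySem.List.index?_isSome_iff _ _).mpr hi) with ⟨ii, hii⟩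
      rcases Option.isSome_iff_exists.mp ((PySem.List.index?_isSome_iff _ _).mpr hj) with ⟨jj, hjj⟩
      simp only [hii, hjj]
      by_cases hij : i = j
      · subst hij
        rw [hii] at hjj
        cases hjj
        rw [set_index_eq_rf i i old_order ii hii, rf_self,
          set_index_eq_rf i i old_order ii hii, rf_self, swapRec_self]
      · exact swapRec_both i j hij old_order ii jj hii hjj
    · rw [if_neg (by simp [hj]), if_pos (by simp [hi]), if_pos (by simp [hi])]
      rcases Option.isSome_iff_exists.mp ((PySem.List.index?_isSome_iff _ _).mpr hi) with ⟨ii, hii⟩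
      simp only [hii]
      rw [set_index_eq_rf i j old_order ii hii, swapRec_no_j i j old_order hj]
  · by_cases hj : j ∈ old_order
    · rw [if_neg (by simp [hi]), if_pos (by simp [hj]), if_neg (by simp [hi])]
      rcases Option.isSome_iff_exists.mp ((PySem.List.index?_isSome_iff _ _).mpr hj) with ⟨jj, hjj⟩
      simp only [hjj]
      rw [set_index_eq_rf j i old_order jj hjj, swapRec_no_i i j old_order hi]
    · rw [if_neg (by simp [hi, hj]), if_neg (by simp [hi, hj])]
      rw [swapRec_no_i i j old_order hi, rf_not_mem old_order j i hj]
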